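-- pv_equiv track=rewrite | github.com/big-oofff/school-projects | sumac6.py | is_one_lump_sequence
-- ===== SOURCE A (Python) =====
-- def is_one_lump_sequence(seq):
--     n = len(seq)
--     if sorted(seq) != list(range(1, n + 1)):
--         return False  # Must be a permutation of 1 to n
--
--     peak_found = False
--     peak_index = -1
--     for i in range(1, n - 1):
--         if seq[i - 1] < seq[i] > seq[i + 1]:
--             peak_found = True
--             peak_index = i
--         elif peak_found and seq[i] < seq[i + 1]:
--             return False  # Sequence must not increase again after peak
--
--     return peak_found and seq[0] < seq[1] and peak_index != -1  # Ensure initial increase and valid peak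
-- ===== SOURCE B (Python) =====
-- def is_one_lump_sequence(seq):
--     n = len(seq)
--     # O(n) permutation check: mark each value 1..n in a seen-array (no sort)
--     seen = [False] * (n + 1)
--     for v in seq:
--         if not (1 <= v <= n) or seen[v]:
--             return False
--         seen[v] = True
--     # walk up the strictly increasing prefix ...
--     i = 0
--     while i + 1 < n and seq[i] < seq[i + 1]:
--         i += 1
--     if i == 0 or i == n - 1:
--         return False  # peak must be interior
--     # ... then the strictly decreasing rest must reach the end
--     j = i
--     while j + 1 < n and seq[j] > seq[j + 1]:
--         j += 1
--     return j == n - 1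
-- ===== Notes on version B (the rewrite author's own statement) =====
-- stated objective: faster
-- what changed: replaces the sort-and-compare permutation test with an O(n) seen-array check and replaces the stateful peak-flag scan with two monotone pointer walks (up the ascent, down the descent)
import Mathlib
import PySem

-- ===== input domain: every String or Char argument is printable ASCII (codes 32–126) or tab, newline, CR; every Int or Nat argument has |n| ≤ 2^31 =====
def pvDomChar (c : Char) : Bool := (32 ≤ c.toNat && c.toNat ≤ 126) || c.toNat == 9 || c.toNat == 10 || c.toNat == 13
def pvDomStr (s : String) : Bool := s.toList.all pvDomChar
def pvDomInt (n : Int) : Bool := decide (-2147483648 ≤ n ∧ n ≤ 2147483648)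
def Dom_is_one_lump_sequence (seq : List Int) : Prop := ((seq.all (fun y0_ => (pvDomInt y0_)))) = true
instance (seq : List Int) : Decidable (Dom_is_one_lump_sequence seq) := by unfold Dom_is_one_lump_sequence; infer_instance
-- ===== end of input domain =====

-- B replaces A's sort-and-compare permutation test by an O(n) seen-array check and
-- A's stateful peak-flag scan by two monotone pointer walks (ascent, then descent).

-- ===== PORT A =====
-- the for-loop of A: indices i, state (peak_found, peak_index); `none` = the early `return False`.
-- every index i comes from range(1, n-1), so i-1, i, i+1 are in range and pyGetD's default is never observed.
def aLoop (seq : List Int) : List Int → Bool → Int → Option (Bool × Int)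
  | [], pf, pi => some (pf, pi)
  | i :: rest, pf, pi =>
    let a := PySem.List.pyGetD seq (i - 1) 0
    let b := PySem.List.pyGetD seq i 0
    let c := PySem.List.pyGetD seq (i + 1) 0
    if a < b ∧ c < b then aLoop seq rest true i
    else if pf ∧ b < c then none
    else aLoop seq rest pf pi

def is_one_lump_sequence (seq : List Int) : Bool :=
  let n : Int := (seq.length : Int)
  if PySem.List.sorted seq (fun x => x) false ≠ PySem.List.pyRange 1 (n + 1) 1 then false
  else
    match aLoop seq (PySem.List.pyRange 1 (n - 1) 1) false (-1) with
    | none => false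
    | some (pf, pi) =>
        -- `peak_found and seq[0] < seq[1] and peak_index != -1`; when pf is true n ≥ 3,
        -- so seq[0]/seq[1] are in range (Python short-circuits; pyGetD is total, default unobserved)
        pf && decide (PySem.List.pyGetD seq 0 0 < PySem.List.pyGetD seq 1 0) && decide (pi ≠ -1)

-- ===== PORT B =====
-- the seen-array loop of B; `false` = the early `return False`.
-- v is checked to satisfy 1 ≤ v ≤ n before indexing, so pyGetD/pySetD are exact here.
def seenLoop (n : Int) : List Int → List Bool → Bool
  | [], _ => true
  | v :: rest, seen =>
    if ¬(1 ≤ v ∧ v ≤ n) ∨ PySem.List.pyGetD seen v false then false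
    else seenLoop n rest (PySem.List.pySetD seen v true)

-- `while i + 1 < n and seq[i] < seq[i+1]: i += 1`
def climb (seq : List Int) (i : Nat) : Nat :=
  if i + 1 < seq.length ∧ seq.getD i 0 < seq.getD (i + 1) 0 then climb seq (i + 1) else i
termination_by seq.length - i
decreasing_by omega

-- `while j + 1 < n and seq[j] > seq[j+1]: j += 1`
def fall (seq : List Int) (j : Nat) : Nat :=
  if j + 1 < seq.length ∧ seq.getD (j + 1) 0 < seq.getD j 0 then fall seq (j + 1) else j
termination_by seq.length - j
decreasing_by omega

def is_one_lump_sequence_alt (seq : List Int) : Bool :=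
  let n := seq.length
  if seenLoop (n : Int) seq (List.replicate (n + 1) false) = false then false
  else
    let i := climb seq 0
    if i = 0 ∨ i = n - 1 then false
    else decide (fall seq i = n - 1)

-- ===== PRECONDITION & SPEC =====
def Spec_is_one_lump_sequence (seq : List Int) (out : Bool) : Prop := out = is_one_lump_sequence_alt seq
instance (seq : List Int) (out : Bool) : Decidable (Spec_is_one_lump_sequence seq out) := by unfold Spec_is_one_lump_sequence; infer_instance

-- ===== CLAIM (what is proved, stated in full; the proofs are below) =====
def Claim_equal_is_one_lump_sequence : Prop := ∀ (seq : List Int), Dom_is_one_lump_sequence seq → Spec_is_one_lump_sequence seq (is_one_lump_sequence seq)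

-- ===== LEMMAS AND PROOFS =====

-- strict rise / strict drop between adjacent positions, and an interior peak
def ltAt (seq : List Int) (j : Nat) : Prop := seq.getD j 0 < seq.getD (j + 1) 0
def gtAt (seq : List Int) (j : Nat) : Prop := seq.getD (j + 1) 0 < seq.getD j 0
def PeakAt (seq : List Int) (p : Nat) : Prop := seq.getD (p - 1) 0 < seq.getD p 0 ∧ gtAt seq p
def AdjDist (seq : List Int) : Prop := ∀ j : Nat, j + 1 < seq.length → seq.getD j 0 ≠ seq.getD (j + 1) 0

-- the common shape: strictly up to an interior peak k, strictly down after it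
def UPred (seq : List Int) : Prop :=
  ∃ k : Nat, 0 < k ∧ k + 1 < seq.length ∧ (∀ j : Nat, j < k → ltAt seq j) ∧
    (∀ j : Nat, k ≤ j → j + 1 < seq.length → gtAt seq j)

-- final-value extractor for A's loop state (peak_found and peak_index != -1)
def G : Option (Bool × Int) → Bool
  | none => false
  | some (pf, pi) => pf && decide (pi ≠ -1)

lemma aLoop_true (seq : List Int) (hd : AdjDist seq) :
    ∀ m : Nat, ∀ t : Int, 1 ≤ t → ((seq.length : Int) - 1 - t).toNat ≤ m → ∀ p : Int, p ≠ -1 →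
      (G (aLoop seq (PySem.List.pyRange t ((seq.length : Int) - 1) 1) true p) = true ↔
        ∀ j : Nat, t ≤ (j : Int) → j + 1 < seq.length → gtAt seq j) := by
  intro m
  induction m with
  | zero =>
    intro t ht hm p hp
    rw [PySem.List.pyRange_one_eq_nil (by omega)]
    simp only [aLoop, G]
    constructor
    · intro _ j hj hj1
      exfalso
      omega
    · intro _
      simp [hp]
  | succ m ih =>
    intro t ht hm p hp
    by_cases hlt : t < (seq.length : Int) - 1
    · rw [PySem.List.pyRange_one_cons hlt]
      obtain ⟨j, hj, hj1, hj2⟩ : ∃ j : Nat, (j : Int) = t ∧ 1 ≤ j ∧ j + 1 < seq.length :=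
        ⟨t.toNat, by omega, by omega, by omega⟩
      have ea : PySem.List.pyGetD seq (t - 1) 0 = seq.getD (j - 1) 0 := by
        rw [show t - 1 = ((j - 1 : Nat) : Int) by omega, PySem.List.pyGetD_natCast]
      have eb : PySem.List.pyGetD seq t 0 = seq.getD j 0 := by
        rw [← hj, PySem.List.pyGetD_natCast]
      have ec : PySem.List.pyGetD seq (t + 1) 0 = seq.getD (j + 1) 0 := by
        rw [show t + 1 = ((j + 1 : Nat) : Int) by omega, PySem.List.pyGetD_natCast]
      simp only [aLoop, ea, eb, ec]
      by_cases hgt : seq.getD (j + 1) 0 < seq.getD j 0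
      · have hcomb : (∀ j' : Nat, t + 1 ≤ (j' : Int) → j' + 1 < seq.length → gtAt seq j') ↔
            (∀ j' : Nat, t ≤ (j' : Int) → j' + 1 < seq.length → gtAt seq j') := by
          constructor
          · intro h j' h1 h2
            by_cases he : (j' : Int) = t
            · have : j' = j := by omega
              subst this
              exact hgt
            · exact h j' (by omega) h2
          · intro h j' h1 h2
            exact h j' (by omega) h2
        by_cases hpk : seq.getD (j - 1) 0 < seq.getD j 0
        · rw [if_pos ⟨hpk, hgt⟩]
          rw [ih (t + 1) (by omega) (by omega) t (by omega)]
          exact hcomb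
        · rw [if_neg (fun h => hpk h.1), if_neg (fun h => absurd h.2 (not_lt.mpr (le_of_lt hgt)))]
          rw [ih (t + 1) (by omega) (by omega) p hp]
          exact hcomb
      · have hbc : seq.getD j 0 < seq.getD (j + 1) 0 :=
          lt_of_le_of_ne (not_lt.mp hgt) (hd j hj2)
        rw [if_neg (fun h => hgt h.2), if_pos ⟨trivial, hbc⟩]
        simp only [G, Bool.false_eq_true, false_iff]
        intro hall
        have := hall j (by omega) hj2
        unfold gtAt at this
        omega
    · rw [PySem.List.pyRange_one_eq_nil (by omega)]
      simp only [aLoop, G]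
      constructor
      · intro _ j hj hj1
        exfalso
        omega
      · intro _
        simp [hp]

lemma aLoop_false (seq : List Int) (hd : AdjDist seq) :
    ∀ m : Nat, ∀ t : Int, 1 ≤ t → ((seq.length : Int) - 1 - t).toNat ≤ m →
      (G (aLoop seq (PySem.List.pyRange t ((seq.length : Int) - 1) 1) false (-1)) = true ↔
        ∃ p : Nat, t ≤ (p : Int) ∧ p + 1 < seq.length ∧
          (∀ j : Nat, t ≤ (j : Int) → j < p → ¬ PeakAt seq j) ∧ PeakAt seq p ∧
          (∀ j : Nat, p ≤ j → j + 1 < seq.length → gtAt seq j)) := by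
  intro m
  induction m with
  | zero =>
    intro t ht hm
    rw [PySem.List.pyRange_one_eq_nil (by omega)]
    simp only [aLoop, G, Bool.false_and, Bool.false_eq_true, false_iff]
    rintro ⟨p, h1, h2, -⟩
    omega
  | succ m ih =>
    intro t ht hm
    by_cases hlt : t < (seq.length : Int) - 1
    · rw [PySem.List.pyRange_one_cons hlt]
      obtain ⟨j, hj, hj1, hj2⟩ : ∃ j : Nat, (j : Int) = t ∧ 1 ≤ j ∧ j + 1 < seq.length :=
        ⟨t.toNat, by omega, by omega, by omega⟩
      have ea : PySem.List.pyGetD seq (t - 1) 0 = seq.getD (j - 1) 0 := by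
        rw [show t - 1 = ((j - 1 : Nat) : Int) by omega, PySem.List.pyGetD_natCast]
      have eb : PySem.List.pyGetD seq t 0 = seq.getD j 0 := by
        rw [← hj, PySem.List.pyGetD_natCast]
      have ec : PySem.List.pyGetD seq (t + 1) 0 = seq.getD (j + 1) 0 := by
        rw [show t + 1 = ((j + 1 : Nat) : Int) by omega, PySem.List.pyGetD_natCast]
      simp only [aLoop, ea, eb, ec]
      by_cases hpk : seq.getD (j - 1) 0 < seq.getD j 0 ∧ seq.getD (j + 1) 0 < seq.getD j 0
      · rw [if_pos hpk]
        rw [aLoop_true seq hd (((seq.length : Int) - 1 - (t + 1)).toNat) (t + 1) (by omega)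
          le_rfl t (by omega)]
        constructor
        · intro hall
          refine ⟨j, by omega, hj2, fun j' h1 h2 => by omega, hpk, ?_⟩
          intro j' h1 h2
          rcases Nat.eq_or_lt_of_le h1 with rfl | hlt'
          · exact hpk.2
          · exact hall j' (by omega) h2
        · rintro ⟨p, h1, h2, hnp, hpk', hdesc⟩
          have hpj : p = j := by
            by_contra hne
            exact hnp j (by omega) (by omega) hpk
          subst hpj
          intro j' h1 h2
          exact hdesc j' (by omega) h2
      · rw [if_neg hpk, if_neg (fun h => by simp at h)]
        rw [ih (t + 1) (by omega) (by omega)]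
        constructor
        · rintro ⟨p, h1, h2, hnp, hpk', hdesc⟩
          refine ⟨p, by omega, h2, ?_, hpk', hdesc⟩
          intro j' ha hb
          by_cases he : (j' : Int) = t
          · have : j' = j := by omega
            subst this
            exact hpk
          · exact hnp j' (by omega) hb
        · rintro ⟨p, h1, h2, hnp, hpk', hdesc⟩
          have hne : p ≠ j := fun he => by subst he; exact hpk hpk'
          exact ⟨p, by omega, h2, fun j' ha hb => hnp j' (by omega) hb, hpk', hdesc⟩
    · rw [PySem.List.pyRange_one_eq_nil (by omega)]
      simp only [aLoop, G, Bool.false_and, Bool.false_eq_true, false_iff]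
      rintro ⟨p, h1, h2, -⟩
      omega

-- A's loop-plus-final-check is exactly UPred (under distinct neighbours)
lemma A_char (seq : List Int) (hd : AdjDist seq) :
    (G (aLoop seq (PySem.List.pyRange 1 ((seq.length : Int) - 1) 1) false (-1)) = true ∧
      seq.getD 0 0 < seq.getD 1 0) ↔ UPred seq := by
  rw [aLoop_false seq hd (((seq.length : Int) - 1 - 1).toNat) 1 (by omega) le_rfl]
  constructor
  · rintro ⟨⟨p, h1, h2, hnp, hpk, hdesc⟩, h0⟩
    have asc : ∀ j : Nat, j < p → ltAt seq j := by
      intro j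
      induction j with
      | zero => intro _; exact h0
      | succ j' ihj =>
        intro hj
        have hl := ihj (by omega)
        have hnpj := hnp (j' + 1) (by omega) hj
        unfold ltAt at hl ⊢
        unfold PeakAt gtAt at hnpj
        have hfst : seq.getD (j' + 1 - 1) 0 < seq.getD (j' + 1) 0 := by simpa using hl
        have hB : ¬ seq.getD (j' + 1 + 1) 0 < seq.getD (j' + 1) 0 :=
          fun hb => hnpj ⟨hfst, hb⟩
        exact lt_of_le_of_ne (not_lt.mp hB) (hd (j' + 1) (by omega))
    exact ⟨p, by omega, h2, asc, hdesc⟩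
  · rintro ⟨k, hk0, hk1, asc, hdesc⟩
    have h0 : seq.getD 0 0 < seq.getD 1 0 := asc 0 hk0
    refine ⟨⟨k, by omega, hk1, ?_, ⟨?_, hdesc k le_rfl hk1⟩, hdesc⟩, h0⟩
    · intro j _ h2 hpk
      have hlj := asc j h2
      unfold PeakAt gtAt at hpk
      unfold ltAt at hlj
      omega
    · have hlk := asc (k - 1) (by omega)
      unfold ltAt at hlk
      have hke : k - 1 + 1 = k := by omega
      rw [hke] at hlk
      exact hlk

-- climb/fall specifications
lemma climb_lt (seq : List Int) : ∀ i j : Nat, i ≤ j → j < climb seq i → j + 1 < seq.length ∧ ltAt seq j := by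
  have H : ∀ m i j, seq.length - i ≤ m → i ≤ j → j < climb seq i → j + 1 < seq.length ∧ ltAt seq j := by
    intro m
    induction m with
    | zero =>
      intro i j hm hij hj
      rw [climb] at hj
      rw [if_neg (fun h => by omega)] at hj
      omega
    | succ m ih =>
      intro i j hm hij hj
      rw [climb] at hj
      by_cases h : i + 1 < seq.length ∧ seq.getD i 0 < seq.getD (i + 1) 0
      · rw [if_pos h] at hj
        rcases Nat.eq_or_lt_of_le hij with rfl | hlt
        · exact ⟨h.1, h.2⟩
        · exact ih (i + 1) j (by omega) (by omega) hj
      · rw [if_neg h] at hj; omega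
  exact fun i j => H (seq.length - i) i j le_rfl

lemma climb_bound (seq : List Int) : ∀ i : Nat, i < seq.length → climb seq i < seq.length := by
  have H : ∀ m i, seq.length - i ≤ m → i < seq.length → climb seq i < seq.length := by
    intro m
    induction m with
    | zero => intro i hm hi; rw [climb, if_neg (fun h => by omega)]; exact hi
    | succ m ih =>
      intro i hm hi
      rw [climb]
      by_cases h : i + 1 < seq.length ∧ seq.getD i 0 < seq.getD (i + 1) 0
      · rw [if_pos h]; exact ih (i + 1) (by omega) h.1
      · rw [if_neg h]; exact hi
  exact fun i => H (seq.length - i) i le_rfl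

lemma climb_eq (seq : List Int) : ∀ i k : Nat, i ≤ k → k < seq.length →
    (∀ j : Nat, i ≤ j → j < k → ltAt seq j) → ¬(k + 1 < seq.length ∧ ltAt seq k) → climb seq i = k := by
  have H : ∀ m i k, k - i ≤ m → i ≤ k → k < seq.length →
      (∀ j : Nat, i ≤ j → j < k → ltAt seq j) → ¬(k + 1 < seq.length ∧ ltAt seq k) → climb seq i = k := by
    intro m
    induction m with
    | zero =>
      intro i k hm hik hk hasc hstop
      have : i = k := by omega
      subst this
      rw [climb, if_neg (fun h => hstop ⟨h.1, h.2⟩)]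
    | succ m ih =>
      intro i k hm hik hk hasc hstop
      rcases Nat.eq_or_lt_of_le hik with rfl | hlt
      · rw [climb, if_neg (fun h => hstop ⟨h.1, h.2⟩)]
      · rw [climb, if_pos ⟨by omega, hasc i le_rfl hlt⟩]
        exact ih (i + 1) k (by omega) (by omega) hk (fun j h1 h2 => hasc j (by omega) h2) hstop
  exact fun i k => H (k - i) i k le_rfl

lemma fall_gt (seq : List Int) : ∀ i j : Nat, i ≤ j → j < fall seq i → j + 1 < seq.length ∧ gtAt seq j := by
  have H : ∀ m i j, seq.length - i ≤ m → i ≤ j → j < fall seq i → j + 1 < seq.length ∧ gtAt seq j := by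
    intro m
    induction m with
    | zero =>
      intro i j hm hij hj
      rw [fall] at hj
      rw [if_neg (fun h => by omega)] at hj
      omega
    | succ m ih =>
      intro i j hm hij hj
      rw [fall] at hj
      by_cases h : i + 1 < seq.length ∧ seq.getD (i + 1) 0 < seq.getD i 0
      · rw [if_pos h] at hj
        rcases Nat.eq_or_lt_of_le hij with rfl | hlt
        · exact ⟨h.1, h.2⟩
        · exact ih (i + 1) j (by omega) (by omega) hj
      · rw [if_neg h] at hj; omega
  exact fun i j => H (seq.length - i) i j le_rfl

lemma fall_eq (seq : List Int) : ∀ i k : Nat, i ≤ k → k < seq.length →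
    (∀ j : Nat, i ≤ j → j < k → gtAt seq j) → ¬(k + 1 < seq.length ∧ gtAt seq k) → fall seq i = k := by
  have H : ∀ m i k, k - i ≤ m → i ≤ k → k < seq.length →
      (∀ j : Nat, i ≤ j → j < k → gtAt seq j) → ¬(k + 1 < seq.length ∧ gtAt seq k) → fall seq i = k := by
    intro m
    induction m with
    | zero =>
      intro i k hm hik hk hdesc hstop
      have : i = k := by omega
      subst this
      rw [fall, if_neg (fun h => hstop ⟨h.1, h.2⟩)]
    | succ m ih =>
      intro i k hm hik hk hdesc hstop
      rcases Nat.eq_or_lt_of_le hik with rfl | hlt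
      · rw [fall, if_neg (fun h => hstop ⟨h.1, h.2⟩)]
      · rw [fall, if_pos ⟨by omega, hdesc i le_rfl hlt⟩]
        exact ih (i + 1) k (by omega) (by omega) hk (fun j h1 h2 => hdesc j (by omega) h2) hstop
  exact fun i k => H (k - i) i k le_rfl

-- B's pointer walks are exactly UPred
lemma B_char (seq : List Int) :
    (¬(climb seq 0 = 0 ∨ climb seq 0 = seq.length - 1) ∧ fall seq (climb seq 0) = seq.length - 1) ↔
      UPred seq := by
  constructor
  · rintro ⟨hne, hf⟩
    rcases Nat.eq_zero_or_pos seq.length with h0 | hpos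
    · exfalso
      apply hne
      left
      rw [climb, if_neg (fun h => by omega)]
    · have hi := climb_bound seq 0 hpos
      refine ⟨climb seq 0, by omega, by omega, ?_, ?_⟩
      · intro j hj
        exact (climb_lt seq 0 j (Nat.zero_le j) hj).2
      · intro j hij hj1
        exact (fall_gt seq (climb seq 0) j hij (by omega)).2
  · rintro ⟨k, hk0, hk1, hasc, hdesc⟩
    have hck : climb seq 0 = k := by
      apply climb_eq seq 0 k (Nat.zero_le k) (by omega) (fun j _ hj => hasc j hj)
      intro h
      exact absurd (hdesc k le_rfl hk1) (lt_asymm h.2)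
    have hfk : fall seq k = seq.length - 1 := by
      apply fall_eq seq k (seq.length - 1) (by omega) (by omega)
        (fun j h1 h2 => hdesc j h1 (by omega))
      omega
    rw [hck]
    exact ⟨by omega, hfk⟩

-- the seen-array loop succeeds iff seq is duplicate-free with all values in 1..n
lemma seenLoop_char (seq : List Int) : ∀ (vs : List Int) (seen : List Bool),
    seen.length = seq.length + 1 →
    (seenLoop (seq.length : Int) vs seen = true ↔
      vs.Nodup ∧ ∀ v ∈ vs, 1 ≤ v ∧ v ≤ (seq.length : Int) ∧ seen.getD v.toNat false = false) := by
  intro vs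
  induction vs with
  | nil => intro seen hlen; simp [seenLoop]
  | cons v rest ih =>
    intro seen hlen
    rw [seenLoop]
    by_cases hb : 1 ≤ v ∧ v ≤ (seq.length : Int)
    · have hvlt : v.toNat < seen.length := by omega
      have hget : PySem.List.pyGetD seen v false = seen.getD v.toNat false := by
        rw [PySem.List.pyGetD_eq_getElem seen false (by omega) (by omega),
          List.getD_eq_getElem seen false hvlt]
      by_cases hseen : seen.getD v.toNat false = true
      · rw [if_pos (by rw [hget, hseen]; right; rfl)]
        simp only [Bool.false_eq_true, false_iff]
        rintro ⟨-, hall⟩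
        have := (hall v (List.mem_cons_self)).2.2
        rw [hseen] at this
        simp at this
      · have hseen' : seen.getD v.toNat false = false := by
          cases h : seen.getD v.toNat false
          · rfl
          · exact absurd h hseen
        rw [if_neg (by rw [hget, hseen']; rintro (h | h); exact h hb; simp at h)]
        rw [PySem.List.pySetD_of_nonneg seen true (by omega)]
        rw [ih (seen.set v.toNat true) (by rw [List.length_set]; exact hlen)]
        have hset : ∀ w : Int, 1 ≤ w →
            ((seen.set v.toNat true).getD w.toNat false = false ↔
              (w ≠ v ∧ seen.getD w.toNat false = false)) := by
          intro w h1
          rw [List.getD_eq_getElem?_getD, List.getD_eq_getElem?_getD, List.getElem?_set]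
          by_cases hwv : w = v
          · subst hwv
            rw [if_pos rfl, if_pos hvlt]
            simp
          · rw [if_neg (fun h => hwv (by omega))]
            simp [hwv]
        constructor
        · rintro ⟨hnd, hall⟩
          refine ⟨List.nodup_cons.mpr ⟨?_, hnd⟩, ?_⟩
          · intro hv
            have h := (hall v hv).2.2
            have h2 := (hset v (by omega)).mp h
            exact h2.1 rfl
          · intro w hw
            rcases List.mem_cons.mp hw with rfl | hw'
            · exact ⟨hb.1, hb.2, hseen'⟩
            · have h := hall w hw'
              exact ⟨h.1, h.2.1, ((hset w h.1).mp h.2.2).2⟩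
        · rintro ⟨hnd, hall⟩
          have hnd' := List.nodup_cons.mp hnd
          refine ⟨hnd'.2, fun w hw => ?_⟩
          have h := hall w (List.mem_cons_of_mem v hw)
          refine ⟨h.1, h.2.1, (hset w h.1).mpr ⟨?_, h.2.2⟩⟩
          rintro rfl
          exact hnd'.1 hw
    · rw [if_pos (Or.inl hb)]
      simp only [Bool.false_eq_true, false_iff]
      rintro ⟨-, hall⟩
      exact hb ⟨(hall v List.mem_cons_self).1, (hall v List.mem_cons_self).2.1⟩

-- and that is exactly being a permutation of 1..n
lemma perm_iff_seen (seq : List Int) :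
    seq.Perm (PySem.List.pyRange 1 ((seq.length : Int) + 1) 1) ↔
      (seenLoop (seq.length : Int) seq (List.replicate (seq.length + 1) false) = true) := by
  rw [seenLoop_char seq seq (List.replicate (seq.length + 1) false) (List.length_replicate)]
  have hrep : ∀ w : Nat, (List.replicate (seq.length + 1) false).getD w false = false := by
    intro w
    rw [List.getD_eq_getElem?_getD, List.getElem?_replicate]
    split <;> rfl
  constructor
  · intro h
    have hnd : seq.Nodup :=
      (List.Perm.nodup_iff h).mpr (PySem.List.nodup_pyRange_one 1 ((seq.length : Int) + 1))
    refine ⟨hnd, fun v hv => ?_⟩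
    have := (PySem.List.mem_pyRange_one).mp ((List.Perm.mem_iff h).mp hv)
    exact ⟨this.1, by omega, hrep v.toNat⟩
  · rintro ⟨hnd, hall⟩
    have hsub : seq ⊆ PySem.List.pyRange 1 ((seq.length : Int) + 1) 1 := by
      intro v hv
      exact (PySem.List.mem_pyRange_one).mpr ⟨(hall v hv).1, by have := (hall v hv).2.1; omega⟩
    have hsp := List.subperm_of_subset hnd hsub
    apply hsp.perm_of_length_le
    rw [PySem.List.length_pyRange_one]
    omega

-- A's sorted-test is exactly being a permutation of 1..n
lemma perm_iff_sorted (seq : List Int) :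
    seq.Perm (PySem.List.pyRange 1 ((seq.length : Int) + 1) 1) ↔
      PySem.List.sorted seq (fun x => x) false = PySem.List.pyRange 1 ((seq.length : Int) + 1) 1 := by
  constructor
  · intro h
    exact PySem.List.sorted_eq_of_perm_of_pairwise_lt seq
      (PySem.List.pyRange 1 ((seq.length : Int) + 1) 1) (fun x => x) h.symm
      (PySem.List.pairwise_lt_pyRange_one 1 ((seq.length : Int) + 1))
  · intro h
    have := PySem.List.sorted_perm seq (fun x => x) false
    rw [h] at this
    exact this.symm

lemma perm_adjDist (seq : List Int)
    (h : seq.Perm (PySem.List.pyRange 1 ((seq.length : Int) + 1) 1)) : AdjDist seq := by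
  have hnd : seq.Nodup :=
    (List.Perm.nodup_iff h).mpr (PySem.List.nodup_pyRange_one 1 ((seq.length : Int) + 1))
  intro j hj heq
  rw [List.getD_eq_getElem seq 0 (by omega), List.getD_eq_getElem seq 0 hj] at heq
  have := (List.Nodup.getElem_inj_iff hnd).mp heq
  omega

lemma main_eq (seq : List Int) : is_one_lump_sequence seq = is_one_lump_sequence_alt seq := by
  unfold is_one_lump_sequence is_one_lump_sequence_alt
  by_cases hperm : seq.Perm (PySem.List.pyRange 1 ((seq.length : Int) + 1) 1)
  · have hs := (perm_iff_sorted seq).mp hperm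
    have hseen := (perm_iff_seen seq).mp hperm
    have hd := perm_adjDist seq hperm
    rw [if_neg (not_not_intro hs), if_neg (by rw [hseen]; simp)]
    have e1 : PySem.List.pyGetD seq 1 0 = seq.getD 1 0 := by
      rw [show (1 : Int) = ((1 : Nat) : Int) by norm_num, PySem.List.pyGetD_natCast]
    have e0 : PySem.List.pyGetD seq 0 0 = seq.getD 0 0 := by
      rw [show (0 : Int) = ((0 : Nat) : Int) by norm_num, PySem.List.pyGetD_natCast]
    rw [Bool.eq_iff_iff]
    have hA : (match aLoop seq (PySem.List.pyRange 1 ((seq.length : Int) - 1) 1) false (-1) with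
        | none => false
        | some (pf, pi) =>
            pf && decide (PySem.List.pyGetD seq 0 0 < PySem.List.pyGetD seq 1 0) &&
              decide (pi ≠ -1)) = true ↔ UPred seq := by
      rw [← A_char seq hd]
      cases h : aLoop seq (PySem.List.pyRange 1 ((seq.length : Int) - 1) 1) false (-1) with
      | none => simp [G]
      | some pr =>
        obtain ⟨pf, pi⟩ := pr
        cases pf <;> simp [G, e0, e1]
        tauto
    rw [hA, ← B_char seq]
    by_cases hc : climb seq 0 = 0 ∨ climb seq 0 = seq.length - 1
    · rw [if_pos hc]
      simp [hc]
    · rw [if_neg hc]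
      simp [hc]
  · have hsne : ¬ PySem.List.sorted seq (fun x => x) false =
        PySem.List.pyRange 1 ((seq.length : Int) + 1) 1 :=
      fun h => hperm ((perm_iff_sorted seq).mpr h)
    rw [if_pos hsne]
    have hseen : seenLoop ((seq.length : Int)) seq (List.replicate (seq.length + 1) false) = false := by
      cases h : seenLoop ((seq.length : Int)) seq (List.replicate (seq.length + 1) false)
      · rfl
      · exact absurd ((perm_iff_seen seq).mpr h) hperm
    rw [if_pos hseen]

-- ===== VERDICT (by name: the statement is the Claim_ definition above) =====
theorem is_one_lump_sequence_spec : Claim_equal_is_one_lump_sequence := by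
  intro seq _
  exact main_eq seq
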